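-- pv_equiv track=rewrite | github.com/KimSky904/Mirim-School-Hub | 연습5회/2.py | solution
-- ===== SOURCE A (Python) =====
-- def solution(arr) :
--     answer = 0
--     for i in range(len(arr)) :
--         price = arr[i]
--         if i % 4 == 0 :
--             price //= 2
--         answer += price
--     return answer
-- ===== SOURCE B (Python) =====
-- def solution(arr):
--     discounted = arr[::4]
--     return sum(arr) - sum(x - x // 2 for x in discounted)
-- ===== Notes on version B (the rewrite author's own statement) =====
-- stated objective: alternative
-- what changed: B replaces A's single loop with an i % 4 test on every index by a full sum of the array followed by a corrective pass that subtracts x - x//2 over the stride slice arr[::4] of discounted positions.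
import Mathlib
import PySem

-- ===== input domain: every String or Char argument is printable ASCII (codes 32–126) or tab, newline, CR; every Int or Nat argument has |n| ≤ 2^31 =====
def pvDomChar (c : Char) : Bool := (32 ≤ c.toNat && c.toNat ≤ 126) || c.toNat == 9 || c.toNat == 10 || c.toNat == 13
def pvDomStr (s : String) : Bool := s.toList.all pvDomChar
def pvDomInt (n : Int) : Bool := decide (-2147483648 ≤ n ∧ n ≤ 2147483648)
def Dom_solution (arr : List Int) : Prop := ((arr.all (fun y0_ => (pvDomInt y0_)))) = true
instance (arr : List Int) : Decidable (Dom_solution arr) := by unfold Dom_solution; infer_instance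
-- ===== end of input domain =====

-- B replaces A's per-index i % 4 loop by sum(arr) minus a corrective pass over the stride slice arr[::4]; alternative decomposition, same O(n) cost.

-- ===== PORT A =====
def solution (arr : List Int) : Int :=
  (PySem.List.pyRange 0 (arr.length : Int) 1).foldl
    (fun answer i =>
      let price := PySem.List.pyGetD arr i 0
      let price := if PySem.Int.mod i 4 = 0 then PySem.Int.floordiv price 2 else price
      answer + price)
    0

-- ===== PORT B =====
def solution_alt (arr : List Int) : Int :=
  let discounted := (PySem.List.slice? arr none none 4).getD []
  arr.sum - (discounted.map (fun x => x - PySem.Int.floordiv x 2)).sum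

-- ===== PRECONDITION & SPEC =====
def Spec_solution (arr : List Int) (out : Int) : Prop := out = solution_alt arr
instance (arr : List Int) (out : Int) : Decidable (Spec_solution arr out) := by unfold Spec_solution; infer_instance

-- ===== CLAIM (what is proved, stated in full; the proofs are below) =====
def Claim_equal_solution : Prop := ∀ (arr : List Int), Dom_solution arr → Spec_solution arr (solution arr)

-- ===== LEMMAS AND PROOFS =====

-- reference function: m = number of elements until the next discounted position
def pvG : List Int → Nat → Int
  | [], _ => 0
  | x :: xs, m => if m = 0 then PySem.Int.floordiv x 2 + pvG xs 3 else x + pvG xs (m - 1)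

-- every 4th element, with the same countdown counter
def pvHeads4Aux : List Int → Nat → List Int
  | [], _ => []
  | x :: xs, m => if m = 0 then x :: pvHeads4Aux xs 3 else pvHeads4Aux xs (m - 1)

theorem pvG_three (xs : List Int) :
    pvG xs 3 = (xs.take 3).sum + pvG (xs.drop 3) 0 := by
  rcases xs with _ | ⟨a, _ | ⟨b, _ | ⟨c, t⟩⟩⟩ <;> simp [pvG] <;> ring

theorem pvHeads4Aux_three (xs : List Int) :
    pvHeads4Aux xs 3 = pvHeads4Aux (xs.drop 3) 0 := by
  rcases xs with _ | ⟨a, _ | ⟨b, _ | ⟨c, t⟩⟩⟩ <;> simp [pvHeads4Aux]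

theorem pvG_zero_cons (x : Int) (xs : List Int) :
    pvG (x :: xs) 0 = PySem.Int.floordiv x 2 + pvG xs 3 := by
  simp [pvG]

theorem pvH_zero_cons (x : Int) (xs : List Int) :
    pvHeads4Aux (x :: xs) 0 = x :: pvHeads4Aux (xs.drop 3) 0 := by
  simp [pvHeads4Aux, pvHeads4Aux_three]

theorem pvA_eq_pvG (ys : List Int) : ∀ (arr : List Int) (j : Nat) (acc : Int),
    arr.drop j = ys →
    (PySem.List.pyRange (j : Int) (arr.length : Int) 1).foldl
      (fun answer i =>
        let price := PySem.List.pyGetD arr i 0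
        let price := if PySem.Int.mod i 4 = 0 then PySem.Int.floordiv price 2 else price
        answer + price) acc
      = acc + pvG ys ((4 - j % 4) % 4) := by
  induction ys with
  | nil =>
    intro arr j acc h
    have hlen : arr.length ≤ j := by
      by_contra hc
      have := List.drop_eq_nil_iff.mp h
      omega
    rw [PySem.List.pyRange_one_eq_nil (by exact_mod_cast hlen)]
    simp [pvG]
  | cons x ys' ih =>
    intro arr j acc h
    have hj : j < arr.length := by
      by_contra hc
      have h2 : arr.drop j = [] := List.drop_eq_nil_iff.mpr (by omega)
      rw [h2] at h; simp at h
    have hget : arr[j]? = some x := by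
      have h0 := congrArg (fun l : List Int => l[0]?) h
      simpa [List.getElem?_drop] using h0
    have hdrop : arr.drop (j + 1) = ys' := by
      have h1 : List.drop 1 (List.drop j arr) = List.drop (j + 1) arr := by
        rw [List.drop_drop]
      rw [← h1, h]; simp
    have hx : arr[j] = x := by
      have h5 := hget
      rwa [List.getElem?_eq_getElem hj, Option.some_inj] at h5
    have hgetD : PySem.List.pyGetD arr (j : Int) 0 = x := by
      simp [PySem.List.pyGetD, PySem.List.pyGet?, PySem.List.pyIdx?, hj, hx]
    have hmod : PySem.Int.mod (j : Int) 4 = ((j % 4 : Nat) : Int) := by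
      rw [PySem.Int.mod_eq_emod_of_pos (by norm_num : (0:Int) < 4)]
      exact_mod_cast (Int.natCast_mod j 4).symm
    rw [PySem.List.pyRange_one_cons (by exact_mod_cast hj), List.foldl_cons]
    simp only [hgetD, hmod]
    have hrange : ((j : Int) + 1) = ((j + 1 : Nat) : Int) := by push_cast; ring
    rw [hrange]
    by_cases h4 : j % 4 = 0
    · rw [if_pos (by exact_mod_cast h4)]
      rw [ih arr (j + 1) _ hdrop]
      have h1 : (4 - (j + 1) % 4) % 4 = 3 := by omega
      have h0 : (4 - j % 4) % 4 = 0 := by omega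
      rw [h1, h0]
      simp [pvG]
      ring
    · rw [if_neg (by exact_mod_cast h4)]
      rw [ih arr (j + 1) _ hdrop]
      have hmne : (4 - j % 4) % 4 ≠ 0 := by omega
      have hstep : (4 - (j + 1) % 4) % 4 = (4 - j % 4) % 4 - 1 := by omega
      rw [hstep]
      rcases hm : (4 - j % 4) % 4 with _ | m
      · exact absurd hm hmne
      · simp [pvG]
        ring

theorem pvHeads4_count (n : Nat) : ∀ (xs : List Int), xs.length ≤ n →
    List.filterMap (fun k : Nat => xs[(4 * (k : Int)).toNat]?)
      (List.range ((xs.length + 3) / 4)) = pvHeads4Aux xs 0 := by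
  induction n with
  | zero =>
    intro xs hlen
    have hx : xs = [] := List.eq_nil_of_length_eq_zero (by omega)
    subst hx; simp [pvHeads4Aux]
  | succ n ih =>
    intro xs hlen
    rcases xs with _ | ⟨x, rest⟩
    · simp [pvHeads4Aux]
    · have hcnt : ((x :: rest).length + 3) / 4 = ((rest.drop 3).length + 3) / 4 + 1 := by
        simp only [List.length_cons, List.length_drop]
        omega
      rw [hcnt, List.range_succ_eq_map, List.filterMap_cons]
      have h0 : ((x :: rest)[(4 * ((0 : Nat) : Int)).toNat]?) = some x := by norm_num
      rw [h0, List.filterMap_map]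
      have hfun : ∀ k ∈ List.range (((rest.drop 3).length + 3) / 4),
          ((fun k : Nat => (x :: rest)[(4 * (k : Int)).toNat]?) ∘ Nat.succ) k
            = (rest.drop 3)[(4 * (k : Int)).toNat]? := by
        intro k _
        have h1 : (4 * ((Nat.succ k : Nat) : Int)).toNat = 4 + (4 * (k : Int)).toNat := by
          push_cast; omega
        have h2 : ((x :: rest).drop 4)[(4 * (k : Int)).toNat]? = (x :: rest)[4 + (4 * (k : Int)).toNat]? := by
          simpa using (List.getElem?_drop (xs := x :: rest) (i := 4) (j := (4 * (k : Int)).toNat))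
      
        have h3 : (x :: rest).drop 4 = rest.drop 3 := by simp [List.drop_succ_cons]
        simp only [Function.comp, h1, ← h2, h3]
      rw [List.filterMap_congr hfun]
      have hlen' : (rest.drop 3).length ≤ n := by
        simp only [List.length_drop]
        simp only [List.length_cons] at hlen
        omega
      rw [ih (rest.drop 3) hlen', pvH_zero_cons]

theorem pvSlice4 (xs : List Int) :
    PySem.List.slice? xs none none 4 = some (pvHeads4Aux xs 0) := by
  have hmain := pvHeads4_count xs.length xs (le_refl _)
  simp only [PySem.List.slice?, PySem.List.sliceIndices]
  norm_num
  have hc : (if 0 < xs.length then (((xs.length : Int) + 4 - 1) / 4).toNat else 0)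
      = (xs.length + 3) / 4 := by
    split_ifs with h
    · omega
    · omega
  rw [hc]
  exact hmain

theorem pvG_eq_alt (n : Nat) : ∀ (arr : List Int), arr.length ≤ n →
    pvG arr 0 = arr.sum - ((pvHeads4Aux arr 0).map (fun x => x - PySem.Int.floordiv x 2)).sum := by
  induction n with
  | zero =>
    intro arr h
    have hx : arr = [] := List.eq_nil_of_length_eq_zero (by omega)
    subst hx; simp [pvG, pvHeads4Aux]
  | succ n ih =>
    intro arr h
    rcases arr with _ | ⟨x, rest⟩
    · simp [pvG, pvHeads4Aux]
    · rw [pvG_zero_cons, pvG_three, ih (rest.drop 3) (by simp only [List.length_drop]; simp only [List.length_cons] at h; omega)]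
      rw [pvH_zero_cons]
      have hsum : rest.sum = (rest.take 3).sum + (rest.drop 3).sum := by
        conv_lhs => rw [← List.take_append_drop 3 rest]
        rw [List.sum_append]
      simp only [List.sum_cons, List.map_cons, hsum]
      ring

-- ===== VERDICT (by name: the statement is the Claim_ definition above) =====
theorem solution_spec : Claim_equal_solution := by
  intro arr _
  unfold Spec_solution solution solution_alt
  have hA := pvA_eq_pvG arr arr 0 0 (by simp)
  simp only [Nat.cast_zero] at hA
  rw [hA, pvSlice4]
  simp only [Option.getD_some]
  rw [pvG_eq_alt arr.length arr (le_refl _)]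
  norm_num
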